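-- pv_equiv track=rewrite | github.com/Sakethv7/Leetcode-Problems | 855-count-unique-characters-of-all-substrings-of-a-given-string/count-unique-characters-of-all-substrings-of-a-given-string.py | uniqueLetterString
-- ===== SOURCE A (Python) =====
-- def uniqueLetterString(s: str) -> int:
--     n = len(s)
--     # Arrays to store distances:
--     # left[i] = number of ways to choose a start index that makes s[i] the first occurrence in the substring.
--     # right[i] = number of ways to choose an end index that makes s[i] the last occurrence in the substring.
--     left = [0] * n
--     right = [0] * n
--
--     # For each character, find the distance from its previous occurrence.
--     prev_occ = {}
--     for i in range(n):
--         if s[i] in prev_occ: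
--             left[i] = i - prev_occ[s[i]]
--         else:
--             left[i] = i + 1  # All positions [0, i] are valid if there's no previous occurrence.
--         prev_occ[s[i]] = i
--
--     # Similarly, traverse backwards to find the distance to the next occurrence.
--     next_occ = {}
--     for i in range(n - 1, -1, -1):
--         if s[i] in next_occ:
--             right[i] = next_occ[s[i]] - i
--         else:
--             right[i] = n - i  # All positions [i, n-1] are valid if there's no next occurrence.
--         next_occ[s[i]] = i
--
--     # Sum up the contributions: each s[i] contributes left[i] * right[i]
--     result = 0
--     for i in range(n):
--         result += left[i] * right[i]
--     return result
-- ===== SOURCE B (Python) =====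
-- def uniqueLetterString(s: str) -> int:
--     # One forward pass: dp = sum of unique-char counts over substrings ending at i;
--     # occ maps each char to (last occurrence, second-to-last occurrence), default (-1, -1).
--     total = 0
--     dp = 0
--     occ = {}
--     for i, ch in enumerate(s):
--         last, second = occ.get(ch, (-1, -1))
--         dp += (i - last) - (last - second)
--         total += dp
--         occ[ch] = (i, last)
--     return total
-- ===== Notes on version B (the rewrite author's own statement) =====
-- stated objective: faster
-- what changed: Replaced A's three passes (left/right contribution arrays built from two last-occurrence dicts, then a product-sum pass) by a single forward pass keeping a running sum dp of unique-character counts over substrings ending at i, updated from each character's last two occurrence indices.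
import Mathlib
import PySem

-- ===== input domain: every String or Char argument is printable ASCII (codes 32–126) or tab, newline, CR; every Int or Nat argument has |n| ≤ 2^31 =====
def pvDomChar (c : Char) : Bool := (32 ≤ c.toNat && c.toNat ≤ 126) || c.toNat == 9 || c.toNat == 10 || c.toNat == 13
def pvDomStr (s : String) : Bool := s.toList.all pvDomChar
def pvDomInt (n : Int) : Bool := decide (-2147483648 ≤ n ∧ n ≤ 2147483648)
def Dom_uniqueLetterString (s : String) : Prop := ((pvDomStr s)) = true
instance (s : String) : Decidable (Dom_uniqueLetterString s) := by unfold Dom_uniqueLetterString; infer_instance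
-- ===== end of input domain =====

-- B replaces A's three passes by a single forward dp pass (measurably faster by a constant factor);
-- A and B are proved to return the same value on every string.

-- ===== PORT A =====
def uniqueLetterString (s : String) : Int :=
  let l := s.toList
  let n : Int := PySem.Str.len s
  let fwd := (PySem.List.pyRange 0 n 1).foldl
      (fun (st : List Int × PySem.Dict Char Int) i =>
        let c := PySem.List.pyGetD l i ' '
        let L : Int := match st.2.get? c with
          | some j => i - j
          | none => i + 1
        (PySem.List.pySetD st.1 i L, st.2.insert c i))
      (List.replicate l.length (0 : Int), PySem.Dict.empty)
  let left := fwd.1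
  let bwd := (PySem.List.pyRange (n - 1) (-1) (-1)).foldl
      (fun (st : List Int × PySem.Dict Char Int) i =>
        let c := PySem.List.pyGetD l i ' '
        let R : Int := match st.2.get? c with
          | some j => j - i
          | none => n - i
        (PySem.List.pySetD st.1 i R, st.2.insert c i))
      (List.replicate l.length (0 : Int), PySem.Dict.empty)
  let right := bwd.1
  (PySem.List.pyRange 0 n 1).foldl
      (fun acc i => acc + PySem.List.pyGetD left i 0 * PySem.List.pyGetD right i 0) 0

-- ===== PORT B =====
def uniqueLetterString_alt (s : String) : Int :=
  let st := (PySem.List.enumerate s.toList 0).foldl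
      (fun (st : PySem.Dict Char (Int × Int) × Int × Int) p =>
        let pr := st.1.getD p.2 (-1, -1)
        let dp := st.2.1 + (p.1 - pr.1) - (pr.1 - pr.2)
        (st.1.insert p.2 (p.1, pr.1), dp, st.2.2 + dp))
      (PySem.Dict.empty, 0, 0)
  st.2.2

-- ===== PRECONDITION & SPEC =====
def Spec_uniqueLetterString (s : String) (out : Int) : Prop := out = uniqueLetterString_alt s
instance (s : String) (out : Int) : Decidable (Spec_uniqueLetterString s out) := by unfold Spec_uniqueLetterString; infer_instance

-- ===== CLAIM (what is proved, stated in full; the proofs are below) =====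
def Claim_equal_uniqueLetterString : Prop := ∀ (s : String), Dom_uniqueLetterString s → Spec_uniqueLetterString s (uniqueLetterString s)

-- ===== LEMMAS AND PROOFS =====

/-- Index of the last occurrence of `c` in `p`, or `-1` if absent. -/
def lastOcc : List Char → Char → Int
  | [], _ => -1
  | d :: q, c =>
    let r := lastOcc q c
    if 0 ≤ r then r + 1 else if d = c then 0 else -1

/-- Index of the first occurrence of `c` in `q`, or `q.length` if absent. -/
def firstIdx : List Char → Char → Nat
  | [], _ => 0
  | d :: q, c => if d = c then 0 else firstIdx q c + 1

/-- Index of the second-to-last occurrence of `c` in `p`, or `-1`. -/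
def sl (p : List Char) (c : Char) : Int :=
  if 0 ≤ lastOcc p c then lastOcc (p.take (lastOcc p c).toNat) c else -1

def termL (l : List Char) (i : Nat) : Int := (i : Int) - lastOcc (l.take i) (l.getD i ' ')
def termR (l : List Char) (i : Nat) : Int := (firstIdx (l.drop (i + 1)) (l.getD i ' ') : Int) + 1

/-- Value computed by A: sum of per-index contributions. -/
def Fsum (l : List Char) : Int := ∑ i ∈ Finset.range l.length, termL l i * termR l i
/-- Sum of unique-character counts over substrings ending at the last index (B's `dp`). -/
def Dsum (l : List Char) : Int :=
  ∑ i ∈ Finset.range l.length, if l.getD i ' ' ∈ l.drop (i + 1) then 0 else termL l i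
/-- Value computed by B. -/
def Tsum (l : List Char) : Int := ∑ k ∈ Finset.range l.length, Dsum (l.take (k + 1))

theorem lastOcc_ge (p : List Char) (c : Char) : -1 ≤ lastOcc p c := by
  induction p with
  | nil => simp [lastOcc]
  | cons d q ih => simp only [lastOcc]; split_ifs <;> omega

theorem lastOcc_neg (p : List Char) (c : Char) : lastOcc p c = -1 ↔ c ∉ p := by
  induction p with
  | nil => simp [lastOcc]
  | cons d q ih =>
    have hge := lastOcc_ge q c
    simp only [lastOcc, List.mem_cons]
    split_ifs with h1 h2
    · have hq : c ∈ q := by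
        by_contra hq
        rw [ih.mpr hq] at h1; omega
      constructor
      · intro h; exact absurd h (by omega)
      · intro h; exact absurd (Or.inr hq) h
    · constructor
      · intro h; exact absurd h (by decide)
      · intro h; exact absurd (Or.inl h2.symm) h
    · have hq : c ∉ q := ih.mp (by omega)
      have hd : c ≠ d := fun h => h2 h.symm
      simp [hq, hd]

theorem lastOcc_nonneg_iff (p : List Char) (c : Char) : 0 ≤ lastOcc p c ↔ c ∈ p := by
  have h1 := lastOcc_neg p c
  have h2 := lastOcc_ge p c
  constructor
  · intro h
    by_contra hm
    rw [h1.mpr hm] at h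
    omega
  · intro h
    by_contra hn
    exact (h1.mp (by omega)) h

theorem lastOcc_snoc (p : List Char) (d c : Char) :
    lastOcc (p ++ [d]) c = if d = c then (p.length : Int) else lastOcc p c := by
  induction p with
  | nil => simp [lastOcc]
  | cons e q ih =>
    simp only [List.cons_append, lastOcc, ih]
    by_cases hd : d = c
    · rw [if_pos hd, if_pos hd, if_pos (Int.natCast_nonneg q.length)]
      simp only [List.length_cons]
      push_cast; ring
    · rw [if_neg hd, if_neg hd]

theorem lastOcc_spec (p : List Char) (c : Char) (h : c ∈ p) :
    0 ≤ lastOcc p c ∧ (lastOcc p c).toNat < p.length ∧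
    p.getD (lastOcc p c).toNat ' ' = c ∧ c ∉ p.drop ((lastOcc p c).toNat + 1) := by
  induction p with
  | nil => cases h
  | cons d q ih =>
    by_cases hq : c ∈ q
    · obtain ⟨h0, hlt, hget, hdrop⟩ := ih hq
      have hval : lastOcc (d :: q) c = lastOcc q c + 1 := by simp [lastOcc, h0]
      rw [hval]
      have htn : (lastOcc q c + 1).toNat = (lastOcc q c).toNat + 1 := by omega
      rw [htn]
      refine ⟨by omega, by simpa using hlt, by simpa using hget, by simpa using hdrop⟩
    · have hd : d = c := by
        rcases List.mem_cons.mp h with h' | h'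
        · exact h'.symm
        · exact absurd h' hq
      have hr : lastOcc q c = -1 := (lastOcc_neg q c).mpr hq
      have hval : lastOcc (d :: q) c = 0 := by simp [lastOcc, hr, hd]
      rw [hval]
      exact ⟨le_refl _, by simp, by simpa using hd, by simpa using hq⟩

theorem lastOcc_unique (p : List Char) (c : Char) (i : Nat) (hi : i < p.length)
    (hget : p.getD i ' ' = c) (hdrop : c ∉ p.drop (i + 1)) : lastOcc p c = (i : Int) := by
  induction p generalizing i with
  | nil => simp at hi
  | cons d q ih =>
    cases i with
    | zero =>
      have hd : d = c := by simpa using hget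
      have hq : c ∉ q := by simpa using hdrop
      have hr : lastOcc q c = -1 := (lastOcc_neg q c).mpr hq
      simp [lastOcc, hr, hd]
    | succ j =>
      have hj : j < q.length := by simpa using hi
      have hg : q.getD j ' ' = c := by simpa using hget
      have hdr : c ∉ q.drop (j + 1) := by simpa using hdrop
      have hr := ih j hj hg hdr
      have h0 : 0 ≤ lastOcc q c := by rw [hr]; exact Int.natCast_nonneg j
      have hval : lastOcc (d :: q) c = lastOcc q c + 1 := by simp [lastOcc, h0]
      rw [hval, hr]
      push_cast; ring

theorem firstIdx_of_not_mem (q : List Char) (c : Char) (h : c ∉ q) : firstIdx q c = q.length := by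
  induction q with
  | nil => simp [firstIdx]
  | cons d t ih =>
    have hd : d ≠ c := fun hh => h (by simp [hh])
    have ht : c ∉ t := fun hh => h (by simp [hh])
    simp [firstIdx, hd, ih ht]

theorem firstIdx_snoc (q : List Char) (d c : Char) :
    firstIdx (q ++ [d]) c =
      if c ∈ q then firstIdx q c else (if d = c then q.length else q.length + 1) := by
  induction q with
  | nil => by_cases h : d = c <;> simp [firstIdx, h]
  | cons e t ih =>
    by_cases he : e = c
    · simp [firstIdx, he]
    · have hmem : (c ∈ e :: t) ↔ c ∈ t := by
        constructor
        · intro h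
          rcases List.mem_cons.mp h with h' | h'
          · exact absurd h'.symm he
          · exact h'
        · intro h; exact List.mem_cons_of_mem _ h
      simp only [List.cons_append, firstIdx, if_neg he, ih, hmem, List.length_cons]
      split_ifs <;> omega

-- ===== snoc behaviour of the per-index terms =====

theorem termL_snoc_lt (p : List Char) (c : Char) (i : Nat) (hi : i < p.length) :
    termL (p ++ [c]) i = termL p i := by
  unfold termL
  rw [List.take_append_of_le_length (by omega), List.getD_append _ _ _ _ (by omega)]

theorem termL_snoc_last (p : List Char) (c : Char) :
    termL (p ++ [c]) p.length = (p.length : Int) - lastOcc p c := by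
  unfold termL
  rw [List.take_append_of_le_length (le_refl _), List.take_length]
  congr 1
  rw [List.getD_append_right _ _ _ _ (le_refl _)]
  simp

theorem termR_snoc_lt (p : List Char) (c : Char) (i : Nat) (hi : i < p.length) :
    termR (p ++ [c]) i =
      termR p i + (if p.getD i ' ' ∈ p.drop (i + 1) ∨ p.getD i ' ' = c then 0 else 1) := by
  unfold termR
  rw [List.getD_append _ _ _ _ (by omega), List.drop_append_of_le_length (by omega), firstIdx_snoc]
  by_cases hm : p.getD i ' ' ∈ p.drop (i + 1)
  · rw [if_pos hm, if_pos (Or.inl hm)]; ring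
  · rw [if_neg hm, firstIdx_of_not_mem _ _ hm]
    by_cases he : p.getD i ' ' = c
    · rw [if_pos he.symm, if_pos (Or.inr he)]; ring
    · rw [if_neg (fun h => he h.symm), if_neg (by tauto)]
      push_cast; ring

theorem termR_snoc_last (p : List Char) (c : Char) : termR (p ++ [c]) p.length = 1 := by
  unfold termR
  rw [List.drop_eq_nil_of_le (by simp)]
  simp [firstIdx]

-- ===== the three sum identities =====

theorem getD_append_last (p : List Char) (c : Char) : (p ++ [c]).getD p.length ' ' = c := by
  rw [List.getD_append_right _ _ _ _ (le_refl _)]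
  simp

theorem Fsum_snoc (p : List Char) (c : Char) : Fsum (p ++ [c]) = Fsum p + Dsum (p ++ [c]) := by
  unfold Fsum Dsum
  have hlen : (p ++ [c]).length = p.length + 1 := by simp
  rw [hlen, Finset.sum_range_succ, Finset.sum_range_succ, termL_snoc_last, termR_snoc_last,
    getD_append_last, List.drop_eq_nil_of_le (by simp : (p ++ [c]).length ≤ p.length + 1)]
  simp only [List.not_mem_nil, if_false, mul_one]
  have key : (∑ i ∈ Finset.range p.length, termL (p ++ [c]) i * termR (p ++ [c]) i)
      = (∑ i ∈ Finset.range p.length, termL p i * termR p i)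
        + ∑ i ∈ Finset.range p.length,
            (if (p ++ [c]).getD i ' ' ∈ (p ++ [c]).drop (i + 1) then (0 : Int)
              else termL (p ++ [c]) i) := by
    rw [← Finset.sum_add_distrib]
    apply Finset.sum_congr rfl
    intro i hi
    have hi' : i < p.length := Finset.mem_range.mp hi
    have hg : (p ++ [c]).getD i ' ' = p.getD i ' ' := List.getD_append _ _ _ _ (by omega)
    have hdp : (p ++ [c]).drop (i + 1) = p.drop (i + 1) ++ [c] :=
      List.drop_append_of_le_length (by omega)
    have hmem : (p.getD i ' ' ∈ p.drop (i + 1) ++ [c]) ↔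
        (p.getD i ' ' ∈ p.drop (i + 1) ∨ p.getD i ' ' = c) := by simp
    rw [termL_snoc_lt _ _ _ hi', termR_snoc_lt _ _ _ hi']
    simp only [hg, hdp, hmem]
    split_ifs <;> ring
  rw [key]
  ring

theorem Dsum_snoc (p : List Char) (c : Char) :
    Dsum (p ++ [c]) = Dsum p + ((p.length : Int) - lastOcc p c) - (lastOcc p c - sl p c) := by
  have hsingle : (∑ i ∈ Finset.range p.length,
      if p.getD i ' ' ∉ p.drop (i + 1) ∧ p.getD i ' ' = c then termL p i else 0) =
      lastOcc p c - sl p c := by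
    by_cases hc : c ∈ p
    · obtain ⟨h0, hlt, hget, hdrop⟩ := lastOcc_spec p c hc
      have hsl : sl p c = lastOcc (p.take (lastOcc p c).toNat) c := by
        unfold sl; rw [if_pos h0]
      rw [Finset.sum_eq_single_of_mem (lastOcc p c).toNat (Finset.mem_range.mpr hlt)]
      · rw [if_pos ⟨by rw [hget]; exact hdrop, hget⟩]
        unfold termL
        rw [hget, hsl]
        omega
      · intro j hj hne
        rw [if_neg]
        rintro ⟨hd, hg⟩
        have hd' : c ∉ p.drop (j + 1) := hg ▸ hd
        have := lastOcc_unique p c j (Finset.mem_range.mp hj) hg hd'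
        omega
    · have hall : ∀ i ∈ Finset.range p.length,
          (if p.getD i ' ' ∉ p.drop (i + 1) ∧ p.getD i ' ' = c then termL p i else 0) = 0 := by
        intro i hi
        rw [if_neg]
        rintro ⟨-, hg⟩
        have hmem : p.getD i ' ' ∈ p := by
          rw [List.getD_eq_getElem p ' ' (Finset.mem_range.mp hi)]
          exact List.getElem_mem _
        exact hc (hg ▸ hmem)
      rw [Finset.sum_congr rfl hall, Finset.sum_const_zero]
      have h1 : lastOcc p c = -1 := (lastOcc_neg p c).mpr hc
      have h2 : sl p c = -1 := by unfold sl; rw [if_neg (by omega)]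
      omega
  unfold Dsum
  have hlen : (p ++ [c]).length = p.length + 1 := by simp
  rw [hlen, Finset.sum_range_succ, getD_append_last,
    List.drop_eq_nil_of_le (by simp : (p ++ [c]).length ≤ p.length + 1), termL_snoc_last]
  simp only [List.not_mem_nil, if_false]
  have key : (∑ i ∈ Finset.range p.length,
      if (p ++ [c]).getD i ' ' ∈ (p ++ [c]).drop (i + 1) then (0 : Int) else termL (p ++ [c]) i)
      = (∑ i ∈ Finset.range p.length,
          if p.getD i ' ' ∈ p.drop (i + 1) then (0 : Int) else termL p i)
        - (lastOcc p c - sl p c) := by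
    rw [← hsingle, ← Finset.sum_sub_distrib]
    apply Finset.sum_congr rfl
    intro i hi
    have hi' : i < p.length := Finset.mem_range.mp hi
    have hg : (p ++ [c]).getD i ' ' = p.getD i ' ' := List.getD_append _ _ _ _ (by omega)
    have hdp : (p ++ [c]).drop (i + 1) = p.drop (i + 1) ++ [c] :=
      List.drop_append_of_le_length (by omega)
    have hmem : (p.getD i ' ' ∈ p.drop (i + 1) ++ [c]) ↔
        (p.getD i ' ' ∈ p.drop (i + 1) ∨ p.getD i ' ' = c) := by simp
    rw [termL_snoc_lt _ _ _ hi']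
    simp only [hg, hdp, hmem]
    by_cases h1 : p.getD i ' ' ∈ p.drop (i + 1)
    · rw [if_pos (Or.inl h1), if_pos h1, if_neg (fun hh => hh.1 h1)]
      ring
    · by_cases h2 : p.getD i ' ' = c
      · rw [if_pos (Or.inr h2), if_neg h1, if_pos ⟨h1, h2⟩]
        ring
      · rw [if_neg (by tauto), if_neg h1, if_neg (by tauto)]
        ring
  rw [key]
  ring

theorem Tsum_snoc (p : List Char) (c : Char) : Tsum (p ++ [c]) = Tsum p + Dsum (p ++ [c]) := by
  unfold Tsum
  have hlen : (p ++ [c]).length = p.length + 1 := by simp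
  rw [hlen, Finset.sum_range_succ, List.take_of_length_le (by simp)]
  congr 1
  apply Finset.sum_congr rfl
  intro k hk
  rw [List.take_append_of_le_length (by simpa using Finset.mem_range.mp hk)]

theorem Fsum_eq_Tsum (l : List Char) : Fsum l = Tsum l := by
  induction l using List.reverseRecOn with
  | nil => simp [Fsum, Tsum]
  | append_singleton p c ih => rw [Fsum_snoc, Tsum_snoc, ih]

-- ===== port A computes Fsum =====

/-- The forward loop body of A, at a natural index. -/
def bodyF (l : List Char) (st : List Int × PySem.Dict Char Int) (k : Nat) :
    List Int × PySem.Dict Char Int :=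
  (st.1.set k (match st.2.get? (l.getD k ' ') with
      | some j => (k : Int) - j
      | none => (k : Int) + 1),
   st.2.insert (l.getD k ' ') (k : Int))

/-- The backward loop body of A, at an integer index. -/
def bodyB (l : List Char) (st : List Int × PySem.Dict Char Int) (i : Int) :
    List Int × PySem.Dict Char Int :=
  (PySem.List.pySetD st.1 i (match st.2.get? (PySem.List.pyGetD l i ' ') with
      | some j => j - i
      | none => (l.length : Int) - i),
   st.2.insert (PySem.List.pyGetD l i ' ') i)

theorem set_map_range {α : Type} (n k : Nat) (f : Nat → α) (v : α) (_hk : k < n) :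
    ((List.range n).map f).set k v = (List.range n).map (fun i => if i = k then v else f i) := by
  apply List.ext_getElem
  · simp
  · intro i h1 h2
    simp only [List.getElem_set, List.getElem_map, List.getElem_range]
    by_cases h : k = i
    · rw [if_pos h, if_pos h.symm]
    · rw [if_neg h, if_neg (fun hh => h hh.symm)]

theorem replicate_eq_map_range {α : Type} (n : Nat) (a : α) :
    List.replicate n a = (List.range n).map (fun _ => a) := by
  simp [List.map_const']

theorem fwdInv (l : List Char) (k : Nat) (hk : k ≤ l.length) :
    ∃ d : PySem.Dict Char Int,
      (List.range k).foldl (bodyF l) (List.replicate l.length (0 : Int), PySem.Dict.empty) =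
        ((List.range l.length).map (fun i => if i < k then termL l i else 0), d) ∧
      ∀ c, d.get? c = if c ∈ l.take k then some (lastOcc (l.take k) c) else none := by
  induction k with
  | zero =>
    refine ⟨PySem.Dict.empty, ?_, ?_⟩
    · have h0 : (List.range l.length).map (fun _ => (0 : Int)) =
          (List.range l.length).map (fun i => if i < 0 then termL l i else 0) := by
        apply List.map_congr_left
        intro i _
        rw [if_neg (Nat.not_lt_zero i)]
      rw [List.range_zero, List.foldl_nil, replicate_eq_map_range, h0]
    · intro c
      rw [PySem.Dict.get?_empty, List.take_zero, if_neg (List.not_mem_nil)]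
  | succ k ih =>
    obtain ⟨d, heq, hd⟩ := ih (by omega)
    have hk' : k < l.length := by omega
    have htake : l.take (k + 1) = l.take k ++ [l.getD k ' '] := by
      rw [List.take_add_one, List.getElem?_eq_getElem hk', List.getD_eq_getElem l ' ' hk']
      rfl
    have hlist : ((List.range l.length).map (fun i => if i < k then termL l i else 0)).set k (termL l k)
        = (List.range l.length).map (fun i => if i < k + 1 then termL l i else 0) := by
      rw [set_map_range _ _ _ _ hk']
      apply List.map_congr_left
      intro i _
      by_cases hik : i = k
      · subst hik; simp
      · have h2 : (i < k + 1) ↔ i < k := by omega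
        simp [hik, h2]
    have hdict : ∀ c, ((d.insert (l.getD k ' ') (k : Int)).get? c) =
        if c ∈ l.take (k + 1) then some (lastOcc (l.take (k + 1)) c) else none := by
      intro c
      rw [PySem.Dict.get?_insert, htake]
      by_cases hcc : c = l.getD k ' '
      · have hmm : c ∈ l.take k ++ [l.getD k ' '] := by
          rw [List.mem_append, List.mem_singleton]
          exact Or.inr hcc
        rw [if_pos hcc, if_pos hmm, lastOcc_snoc, if_pos hcc.symm,
          List.length_take_of_le hk'.le]
      · rw [if_neg hcc, lastOcc_snoc, if_neg (fun h : l.getD k ' ' = c => hcc h.symm), hd c]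
        have hmem : (c ∈ l.take k ++ [l.getD k ' ']) ↔ c ∈ l.take k := by
          rw [List.mem_append, List.mem_singleton]
          constructor
          · intro h
            rcases h with h | h
            · exact h
            · exact absurd h hcc
          · intro h
            exact Or.inl h
        simp only [hmem]
    rw [List.range_succ, List.foldl_append, heq, List.foldl_cons, List.foldl_nil]
    refine ⟨d.insert (l.getD k ' ') (k : Int), ?_, hdict⟩
    unfold bodyF
    by_cases hm : l.getD k ' ' ∈ l.take k
    · have hget : d.get? (l.getD k ' ') = some (lastOcc (l.take k) (l.getD k ' ')) := by
        rw [hd, if_pos hm]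
      simp only [hget]
      rw [show (k : Int) - lastOcc (l.take k) (l.getD k ' ') = termL l k from rfl, hlist]
    · have hget : d.get? (l.getD k ' ') = none := by
        rw [hd, if_neg hm]
      simp only [hget]
      have hL : (k : Int) + 1 = termL l k := by
        unfold termL
        rw [(lastOcc_neg _ _).mpr hm]
        ring
      rw [hL, hlist]

theorem bwdInv (l : List Char) (k : Nat) (hk : k ≤ l.length) (f0 : Nat → Int)
    (d : PySem.Dict Char Int)
    (hd : ∀ c, d.get? c =
      if c ∈ l.drop k then some (((k : Int)) + (firstIdx (l.drop k) c : Int)) else none) :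
    ((PySem.List.pyRange ((k : Int) - 1) (-1) (-1)).foldl (bodyB l)
        ((List.range l.length).map f0, d)).1 =
      (List.range l.length).map (fun i => if i < k then termR l i else f0 i) := by
  induction k generalizing f0 d with
  | zero =>
    rw [PySem.List.pyRange_neg_one_eq_nil (by norm_num), List.foldl_nil]
    apply List.map_congr_left
    intro i _; simp
  | succ k ih =>
    have hk' : k < l.length := by omega
    have hdrop : l.drop k = l.getD k ' ' :: l.drop (k + 1) := by
      rw [List.drop_eq_getElem_cons hk', List.getD_eq_getElem l ' ' hk']
    have hcast : ((k + 1 : Nat) : Int) - 1 = ((k : Nat) : Int) := by push_cast; ring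
    rw [hcast, PySem.List.pyRange_neg_one_cons (by omega), List.foldl_cons]
    have hstep : bodyB l ((List.range l.length).map f0, d) ((k : Nat) : Int) =
        ((List.range l.length).map (fun i => if i = k then termR l k else f0 i),
          d.insert (l.getD k ' ') (k : Int)) := by
      unfold bodyB
      rw [PySem.List.pyGetD_natCast, PySem.List.pySetD_natCast]
      by_cases hm : l.getD k ' ' ∈ l.drop (k + 1)
      · have hget : d.get? (l.getD k ' ') =
            some (((k + 1 : Nat) : Int) + (firstIdx (l.drop (k + 1)) (l.getD k ' ') : Int)) := by
          rw [hd, if_pos hm]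
        simp only [hget]
        have hval : ((k + 1 : Nat) : Int) + (firstIdx (l.drop (k + 1)) (l.getD k ' ') : Int) - (k : Int)
            = termR l k := by
          unfold termR
          push_cast; ring
        rw [hval, set_map_range _ _ _ _ hk']
      · have hget : d.get? (l.getD k ' ') = none := by
          rw [hd, if_neg hm]
        simp only [hget]
        have hval : ((l.length : Int)) - (k : Int) = termR l k := by
          unfold termR
          rw [firstIdx_of_not_mem _ _ hm, List.length_drop]
          omega
        rw [hval, set_map_range _ _ _ _ hk']
    rw [hstep, ih (by omega) _ (d.insert (l.getD k ' ') (k : Int)) ?_]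
    · apply List.map_congr_left
      intro i _
      by_cases hik : i = k
      · subst hik; simp
      · have h2 : (i < k + 1) ↔ i < k := by omega
        simp [hik, h2]
    · intro c
      rw [PySem.Dict.get?_insert]
      simp only [hdrop]
      by_cases hc : c = l.getD k ' '
      · have hmm : c ∈ l.getD k ' ' :: l.drop (k + 1) := by
          rw [List.mem_cons]; exact Or.inl hc
        have h0 : firstIdx (l.getD k ' ' :: l.drop (k + 1)) c = 0 := by
          simp only [firstIdx]
          rw [if_pos hc.symm]
        rw [if_pos hc, if_pos hmm, h0]
        norm_num
      · have hmem : (c ∈ l.getD k ' ' :: l.drop (k + 1)) ↔ c ∈ l.drop (k + 1) := by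
          rw [List.mem_cons]
          constructor
          · intro h
            rcases h with h | h
            · exact absurd h hc
            · exact h
          · intro h; exact Or.inr h
        have h1 : firstIdx (l.getD k ' ' :: l.drop (k + 1)) c = firstIdx (l.drop (k + 1)) c + 1 := by
          simp only [firstIdx]
          rw [if_neg (fun h => hc h.symm)]
        rw [if_neg hc, hd c]
        simp only [hmem, h1]
        by_cases hmm : c ∈ l.drop (k + 1)
        · rw [if_pos hmm, if_pos hmm]
          congr 1
          push_cast; ring
        · rw [if_neg hmm, if_neg hmm]

theorem foldl_add_range (n : Nat) (g : Nat → Int) (a : Int) :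
    (List.range n).foldl (fun acc k => acc + g k) a = a + ∑ i ∈ Finset.range n, g i := by
  induction n generalizing a with
  | zero => simp
  | succ n ih =>
    rw [List.range_succ, List.foldl_append, Finset.sum_range_succ, ih, List.foldl_cons,
      List.foldl_nil]
    ring

theorem portA_eq_Fsum (s : String) : uniqueLetterString s = Fsum s.toList := by
  simp only [uniqueLetterString, PySem.Str.len_eq]
  have hfwd :
      (PySem.List.pyRange 0 (s.toList.length : Int) 1).foldl
        (fun (st : List Int × PySem.Dict Char Int) i =>
          let c := PySem.List.pyGetD s.toList i ' '
          let L : Int := match st.2.get? c with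
            | some j => i - j
            | none => i + 1
          (PySem.List.pySetD st.1 i L, st.2.insert c i))
        (List.replicate s.toList.length (0 : Int), PySem.Dict.empty) =
      (List.range s.toList.length).foldl (bodyF s.toList)
        (List.replicate s.toList.length (0 : Int), PySem.Dict.empty) := by
    rw [PySem.List.pyRange_one, sub_zero, Int.toNat_natCast, List.foldl_map]
    apply PySem.List.foldl_congr_mem
    intro acc k _
    simp [bodyF]
  rw [hfwd]
  obtain ⟨dA, heqA, -⟩ := fwdInv s.toList s.toList.length (le_refl _)
  rw [heqA]
  have hbwd :
      ((PySem.List.pyRange ((s.toList.length : Int) - 1) (-1) (-1)).foldl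
        (fun (st : List Int × PySem.Dict Char Int) i =>
          let c := PySem.List.pyGetD s.toList i ' '
          let R : Int := match st.2.get? c with
            | some j => j - i
            | none => (s.toList.length : Int) - i
          (PySem.List.pySetD st.1 i R, st.2.insert c i))
        (List.replicate s.toList.length (0 : Int), PySem.Dict.empty)).1 =
      (List.range s.toList.length).map (fun i => if i < s.toList.length then termR s.toList i else 0) := by
    have hcongr :
        (PySem.List.pyRange ((s.toList.length : Int) - 1) (-1) (-1)).foldl
          (fun (st : List Int × PySem.Dict Char Int) i =>
            let c := PySem.List.pyGetD s.toList i ' '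
            let R : Int := match st.2.get? c with
              | some j => j - i
              | none => (s.toList.length : Int) - i
            (PySem.List.pySetD st.1 i R, st.2.insert c i))
          (List.replicate s.toList.length (0 : Int), PySem.Dict.empty) =
        (PySem.List.pyRange ((s.toList.length : Int) - 1) (-1) (-1)).foldl (bodyB s.toList)
          (List.replicate s.toList.length (0 : Int), PySem.Dict.empty) := by
      apply PySem.List.foldl_congr_mem
      intro acc i _
      simp [bodyB]
    rw [hcongr, replicate_eq_map_range]
    apply bwdInv s.toList s.toList.length (le_refl _) (fun _ => 0) PySem.Dict.empty
    intro c
    rw [PySem.Dict.get?_empty, List.drop_length]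
    simp
  rw [hbwd]
  have hL : (List.range s.toList.length).map
      (fun i => if i < s.toList.length then termL s.toList i else 0) =
      (List.range s.toList.length).map (termL s.toList) := by
    apply List.map_congr_left
    intro i hi
    rw [if_pos (List.mem_range.mp hi)]
  have hR : (List.range s.toList.length).map
      (fun i => if i < s.toList.length then termR s.toList i else 0) =
      (List.range s.toList.length).map (termR s.toList) := by
    apply List.map_congr_left
    intro i hi
    rw [if_pos (List.mem_range.mp hi)]
  rw [hL, hR]
  rw [PySem.List.pyRange_one, sub_zero, Int.toNat_natCast, List.foldl_map]
  have hbody : ∀ (a : Int), ∀ k ∈ List.range s.toList.length,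
      a + PySem.List.pyGetD ((List.range s.toList.length).map (termL s.toList)) ((0 : Int) + (k : Int)) 0 *
          PySem.List.pyGetD ((List.range s.toList.length).map (termR s.toList)) ((0 : Int) + (k : Int)) 0 =
        a + termL s.toList k * termR s.toList k := by
    intro a k hk
    have hk' : k < s.toList.length := List.mem_range.mp hk
    rw [zero_add, PySem.List.pyGetD_natCast, PySem.List.pyGetD_natCast,
      PySem.List.getD_map_range _ _ _ _ hk', PySem.List.getD_map_range _ _ _ _ hk']
  rw [PySem.List.foldl_congr_mem _ _ _ _ hbody, foldl_add_range]
  unfold Fsum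
  ring

-- ===== port B computes Tsum =====

theorem sl_snoc_self (p : List Char) (c : Char) : sl (p ++ [c]) c = lastOcc p c := by
  unfold sl
  rw [lastOcc_snoc, if_pos rfl, if_pos (Int.natCast_nonneg p.length), Int.toNat_natCast,
    List.take_append_of_le_length (le_refl _), List.take_length]

theorem sl_snoc_ne (p : List Char) (c c' : Char) (h : c' ≠ c) : sl (p ++ [c]) c' = sl p c' := by
  unfold sl
  rw [lastOcc_snoc, if_neg (fun hh : c = c' => h hh.symm)]
  by_cases h0 : 0 ≤ lastOcc p c'
  · rw [if_pos h0, if_pos h0]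
    have hc' : c' ∈ p := (lastOcc_nonneg_iff p c').mp h0
    obtain ⟨-, hlt, -, -⟩ := lastOcc_spec p c' hc'
    rw [List.take_append_of_le_length (by omega)]
  · rw [if_neg h0, if_neg h0]

theorem altInv (l : List Char) :
    ∃ d : PySem.Dict Char (Int × Int),
      (PySem.List.enumerate l 0).foldl
        (fun (st : PySem.Dict Char (Int × Int) × Int × Int) p =>
          let pr := st.1.getD p.2 (-1, -1)
          let dp := st.2.1 + (p.1 - pr.1) - (pr.1 - pr.2)
          (st.1.insert p.2 (p.1, pr.1), dp, st.2.2 + dp))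
        (PySem.Dict.empty, 0, 0) = (d, Dsum l, Tsum l) ∧
      ∀ c, d.getD c (-1, -1) = (lastOcc l c, sl l c) := by
  induction l using List.reverseRecOn with
  | nil =>
    refine ⟨PySem.Dict.empty, ?_, ?_⟩
    · simp [PySem.List.enumerate_nil, Dsum, Tsum]
    · intro c
      rw [PySem.Dict.getD_empty]
      simp [lastOcc, sl]
  | append_singleton p c ih =>
    obtain ⟨d, heq, hd⟩ := ih
    rw [PySem.List.enumerate_append, List.foldl_append, heq, PySem.List.enumerate_cons,
      PySem.List.enumerate_nil, zero_add, List.foldl_cons, List.foldl_nil]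
    refine ⟨d.insert c ((p.length : Int), lastOcc p c), ?_, ?_⟩
    · simp only [hd c]
      have hdp : Dsum p + ((p.length : Int) - lastOcc p c) - (lastOcc p c - sl p c) =
          Dsum (p ++ [c]) := (Dsum_snoc p c).symm
      rw [hdp, Tsum_snoc]
    · intro c'
      rw [PySem.Dict.getD_insert]
      by_cases hc : c' = c
      · rw [if_pos hc, hc, lastOcc_snoc, if_pos rfl, sl_snoc_self]
      · rw [if_neg hc, hd, lastOcc_snoc, if_neg (fun hh : c = c' => hc hh.symm),
          sl_snoc_ne _ _ _ hc]

theorem portB_eq_Tsum (s : String) : uniqueLetterString_alt s = Tsum s.toList := by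
  simp only [uniqueLetterString_alt]
  obtain ⟨d, heq, -⟩ := altInv s.toList
  rw [heq]

-- ===== VERDICT (by name: the statement is the Claim_ definition above) =====
theorem uniqueLetterString_spec : Claim_equal_uniqueLetterString := by
  intro s _
  unfold Spec_uniqueLetterString
  rw [portA_eq_Fsum, portB_eq_Tsum, Fsum_eq_Tsum]
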